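-- pv_equiv track=rewrite | github.com/ahmet-ozel/rag-master-class | Classical-RAG/chunking.py | find_sentence_boundaries
-- ===== SOURCE A (Python) =====
-- from typing import List, Dict, Any, Optional, Tuple
--
-- def find_sentence_boundaries(text: str) -> List[int]:
--     """
--     Find reliable sentence-end positions in *text*.
--     Respects common abbreviations and numbers to avoid false splits.
--     """
--     boundaries: List[int] = []
--     text_len = len(text)
--
--     # Common abbreviations (multilingual) – period after these is NOT a sentence end
--     abbreviations = {
--         # Academic / titles
--         "dr", "prof", "doc", "sr", "jr", "mr", "mrs", "ms", "phd", "md",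
--         # General
--         "vs", "etc", "inc", "ltd", "corp", "co", "dept", "est", "approx",
--         # References / pages
--         "pg", "pp", "vol", "fig", "eq", "ref", "no",
--         # Address
--         "st", "ave", "blvd", "apt", "rd", "fl",
--         # Turkish extras (kept for multilingual support)
--         "yrd", "gör", "bkz", "vb", "a.ş", "şti", "tic", "san",
--     }
--
--     i = 0
--     while i < text_len:
--         char = text[i]
--
--         if char == ".":
--             # Collect the word immediately before the period
--             word_before = ""
--             j = i - 1
--             while j >= 0 and text[j] not in " \n\t":
--                 word_before = text[j] + word_before
--                 j -= 1
--             word_lower = word_before.lower().rstrip(".")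
--
--             # Skip if the character before the period is a digit (e.g. "100.")
--             if word_before and word_before[-1].isdigit():
--                 i += 1
--                 continue
--
--             # Skip known abbreviations
--             if word_lower in abbreviations:
--                 i += 1
--                 continue
--
--             if i + 1 < text_len:
--                 nxt = text[i + 1]
--                 if nxt in " \n\t":
--                     k = i + 2
--                     while k < text_len and text[k] in " \n\t":
--                         k += 1
--                     if k < text_len and text[k].isupper():
--                         boundaries.append(i + 1)
--                 elif nxt == "\n":
--                     boundaries.append(i + 1)
--             elif i == text_len - 1:
--                 boundaries.append(i + 1)
--
--         elif char in "!?":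
--             if i + 1 < text_len and text[i + 1] in " \n\t":
--                 boundaries.append(i + 1)
--             elif i == text_len - 1:
--                 boundaries.append(i + 1)
--
--         i += 1
--
--     return boundaries
-- ===== SOURCE B (Python) =====
-- from typing import List
--
-- _ABBREVIATIONS = {
--     "dr", "prof", "doc", "sr", "jr", "mr", "mrs", "ms", "phd", "md",
--     "vs", "etc", "inc", "ltd", "corp", "co", "dept", "est", "approx",
--     "pg", "pp", "vol", "fig", "eq", "ref", "no",
--     "st", "ave", "blvd", "apt", "rd", "fl",
--     "yrd", "gör", "bkz", "vb", "a.ş", "şti", "tic", "san",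
-- }
--
-- _WS = " \n\t"
--
--
-- def find_sentence_boundaries(text: str) -> List[int]:
--     """Two-stage: tokenize into maximal non-whitespace runs, then decide a
--     boundary only at the LAST character of each token (a sentence-end mark can
--     only fire there), peeking at the next token's first character for the
--     uppercase test."""
--     n = len(text)
--
--     # stage 1: maximal non-whitespace runs as (start, end) pairs
--     tokens = []
--     start = None
--     for i, ch in enumerate(text):
--         if ch in _WS:
--             if start is not None:
--                 tokens.append((start, i))
--                 start = None
--         elif start is None:
--             start = i
--     if start is not None:
--         tokens.append((start, n))
--
--     # stage 2: one decision per token, at its last character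
--     boundaries: List[int] = []
--     for t, (s, e) in enumerate(tokens):
--         ch = text[e - 1]
--         if ch in "!?":
--             boundaries.append(e)
--         elif ch == ".":
--             w = text[s:e - 1]
--             if w and w[-1].isdigit():
--                 continue
--             if w.lower().rstrip(".") in _ABBREVIATIONS:
--                 continue
--             if e == n:
--                 boundaries.append(e)
--             elif t + 1 < len(tokens) and text[tokens[t + 1][0]].isupper():
--                 boundaries.append(e)
--     return boundaries
-- ===== Notes on version B (the rewrite author's own statement) =====
-- stated objective: faster
-- what changed: Replaced A's per-period backward character rescan and per-mark whitespace-lookahead loop with a two-stage algorithm: first tokenize the text into maximal non-whitespace runs, then make one boundary decision per token at its last character, reading the word as a single slice and the uppercase test from the next token's first character.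
import Mathlib
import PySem

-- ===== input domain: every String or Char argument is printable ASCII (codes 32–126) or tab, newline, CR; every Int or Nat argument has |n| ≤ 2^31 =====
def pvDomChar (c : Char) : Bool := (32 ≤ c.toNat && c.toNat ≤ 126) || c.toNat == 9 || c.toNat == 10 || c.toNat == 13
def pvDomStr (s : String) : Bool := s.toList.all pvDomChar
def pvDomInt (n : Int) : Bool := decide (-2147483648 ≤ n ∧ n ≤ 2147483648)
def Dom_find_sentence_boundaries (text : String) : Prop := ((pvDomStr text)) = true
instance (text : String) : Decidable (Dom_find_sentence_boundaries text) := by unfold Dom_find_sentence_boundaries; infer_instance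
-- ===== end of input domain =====

-- B replaces A's per-period backward rescan by a two-stage algorithm (tokenize into
-- maximal non-whitespace runs, then one boundary decision per token at its last
-- character); return-value equivalence proved; a timing run measured B faster.

-- shared constants (identical literals in both Pythons)
def pvWs (c : Char) : Bool := c == ' ' || c == '\n' || c == '\t'

def pvAbbrevs : List (List Char) :=
  ["dr".toList, "prof".toList, "doc".toList, "sr".toList, "jr".toList, "mr".toList,
   "mrs".toList, "ms".toList, "phd".toList, "md".toList,
   "vs".toList, "etc".toList, "inc".toList, "ltd".toList, "corp".toList, "co".toList,
   "dept".toList, "est".toList, "approx".toList,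
   "pg".toList, "pp".toList, "vol".toList, "fig".toList, "eq".toList, "ref".toList, "no".toList,
   "st".toList, "ave".toList, "blvd".toList, "apt".toList, "rd".toList, "fl".toList,
   "yrd".toList, "gör".toList, "bkz".toList, "vb".toList, "a.ş".toList, "şti".toList,
   "tic".toList, "san".toList]

-- exact port of str.rstrip(".") on List Char (only trailing '.' removed)
def pvRstripDot (w : List Char) : List Char := (w.reverse.dropWhile (· == '.')).reverse

-- ===== PORT A =====
-- A's 'while k < n and text[k] in ws: k += 1' lookahead loop
def pvSkipWs (cs : List Char) : List Char → Nat → Nat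
  | [], k => k
  | _ :: rest, k => if pvWs (cs.getD k ' ') then pvSkipWs cs rest (k + 1) else k

-- A's inner backward loop: word_before = text[j] + word_before while j >= 0 and not ws
def pvWordBack (cs : List Char) : Nat → List Char → List Char
  | 0, acc => acc
  | j + 1, acc => if pvWs (cs.getD j ' ') then acc else pvWordBack cs j (cs.getD j ' ' :: acc)

-- 'while i < text_len' transcribed with the remaining suffix (= cs.drop i) as the structural measure
def pvLoopA (cs : List Char) : List Char → Nat → List Int → List Int
  | [], _, acc => acc
  | _ :: rest, i, acc =>
    let c := cs.getD i ' '
    let acc' :=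
      if c == '.' then
        let w := pvWordBack cs i []
        let wl := pvRstripDot (PySem.Chars.lower w)
        if !w.isEmpty && PySem.Chars.isdigit (w.getLastD ' ') then acc
        else if pvAbbrevs.contains wl then acc
        else if i + 1 < cs.length then
          let nxt := cs.getD (i + 1) ' '
          if pvWs nxt then
            let k := pvSkipWs cs (cs.drop (i + 2)) (i + 2)
            if decide (k < cs.length) && PySem.Chars.isupper (cs.getD k ' ') then
              acc ++ [(i : Int) + 1]
            else acc
          else if nxt == '\n' then acc ++ [(i : Int) + 1]
          else acc
        else if i = cs.length - 1 then acc ++ [(i : Int) + 1]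
        else acc
      else if c == '!' || c == '?' then
        if i + 1 < cs.length then
          if pvWs (cs.getD (i + 1) ' ') then acc ++ [(i : Int) + 1] else acc
        else if i = cs.length - 1 then acc ++ [(i : Int) + 1]
        else acc
      else acc
    pvLoopA cs rest (i + 1) acc'

def find_sentence_boundaries (text : String) : List Int :=
  pvLoopA text.toList text.toList 0 []

-- ===== PORT B =====
-- stage 1: maximal non-whitespace runs as (start, end) pairs (Python's first for-loop)
def pvTokGo (n : Nat) : List Char → Nat → Option Nat → List (Nat × Nat) → List (Nat × Nat)
  | [], _, s?, acc =>
    match s? with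
    | some s => acc ++ [(s, n)]
    | none => acc
  | c :: rest, i, s?, acc =>
    if pvWs c then
      match s? with
      | some s => pvTokGo n rest (i + 1) none (acc ++ [(s, i)])
      | none => pvTokGo n rest (i + 1) none acc
    else
      match s? with
      | some _ => pvTokGo n rest (i + 1) s? acc
      | none => pvTokGo n rest (i + 1) (some i) acc

-- stage 2: one decision per token, at its last character (Python's second for-loop;
-- the enumerate/tokens[t+1] lookahead is the head of the remaining token list)
def pvScanToks (cs : List Char) (n : Nat) : List (Nat × Nat) → List Int → List Int
  | [], acc => acc
  | (s, e) :: rest, acc =>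
    let ch := cs.getD (e - 1) ' '
    let acc' :=
      if ch == '!' || ch == '?' then acc ++ [(e : Int)]
      else if ch == '.' then
        let w := PySem.List.slice cs (some (s : Int)) (some ((e : Int) - 1))
        if !w.isEmpty && PySem.Chars.isdigit (w.getLastD ' ') then acc
        else if pvAbbrevs.contains (pvRstripDot (PySem.Chars.lower w)) then acc
        else if e = n then acc ++ [(e : Int)]
        else
          match rest with
          | (s', _) :: _ => if PySem.Chars.isupper (cs.getD s' ' ') then acc ++ [(e : Int)] else acc
          | [] => acc
      else acc
    pvScanToks cs n rest acc'

def find_sentence_boundaries_alt (text : String) : List Int :=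
  let cs := text.toList
  pvScanToks cs cs.length (pvTokGo cs.length cs 0 none []) []

-- ===== PRECONDITION & SPEC =====
def Spec_find_sentence_boundaries (text : String) (out : List Int) : Prop := out = find_sentence_boundaries_alt text
instance (text : String) (out : List Int) : Decidable (Spec_find_sentence_boundaries text out) := by unfold Spec_find_sentence_boundaries; infer_instance

-- ===== CLAIM (what is proved, stated in full; the proofs are below) =====
def Claim_equal_find_sentence_boundaries : Prop := ∀ (text : String), Dom_find_sentence_boundaries text → Spec_find_sentence_boundaries text (find_sentence_boundaries text)

-- ===== LEMMAS AND PROOFS =====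

lemma pvTokGo_append (n : Nat) :
    ∀ (rest : List Char) (i : Nat) (s? : Option Nat) (acc : List (Nat × Nat)),
      pvTokGo n rest i s? acc = acc ++ pvTokGo n rest i s? [] := by
  intro rest
  induction rest with
  | nil => intro i s? acc; cases s? <;> simp [pvTokGo]
  | cons c tl ih =>
    intro i s? acc
    cases s? with
    | none =>
      by_cases h : pvWs c = true <;>
        simp only [pvTokGo, h, if_true, if_false, Bool.false_eq_true] <;> rw [ih]
    | some s =>
      by_cases h : pvWs c = true
      · simp only [pvTokGo, h, if_true]
        rw [ih (i+1) none (acc ++ [(s,i)]), ih (i+1) none ([] ++ [(s,i)])]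
        simp
      · simp only [pvTokGo, h, Bool.false_eq_true, if_false]
        rw [ih]

lemma pvTokGo_some_head (n : Nat) :
    ∀ (rest : List Char) (i s : Nat),
      ∃ x tl, pvTokGo n rest i (some s) [] = (s, x) :: tl := by
  intro rest
  induction rest with
  | nil => intro i s; exact ⟨n, [], by simp [pvTokGo]⟩
  | cons c tl ih =>
    intro i s
    by_cases h : pvWs c = true
    · refine ⟨i, pvTokGo n tl (i+1) none [], ?_⟩
      simp only [pvTokGo, h, if_true]
      rw [pvTokGo_append]
      simp
    · obtain ⟨x, tl', hx⟩ := ih (i+1) s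
      exact ⟨x, tl', by simp only [pvTokGo, h, Bool.false_eq_true, if_false]; exact hx⟩

lemma pvTokGo_head_skip (cs : List Char) :
    ∀ (rest : List Char) (i : Nat), rest = cs.drop i → i ≤ cs.length →
      (pvTokGo cs.length rest i none []).head?.map Prod.fst =
        if pvSkipWs cs rest i < cs.length then some (pvSkipWs cs rest i) else none := by
  intro rest
  induction rest with
  | nil =>
    intro i h hle
    have : i = cs.length := by
      have := congrArg List.length h; simp at this; omega
    simp [pvTokGo, pvSkipWs, this]
  | cons c tl ih =>
    intro i h hle
    have hlt : i < cs.length := by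
      have := congrArg List.length h; simp at this; omega
    have hc : c = cs.getD i ' ' := by
      have : (cs.drop i).head? = some c := by rw [← h]; rfl
      rw [List.head?_drop] at this
      simp [List.getD, List.getElem?_eq_getElem hlt] at this ⊢
      simp [this]
    have htl : tl = cs.drop (i + 1) := by
      have := congrArg List.tail h; simpa [List.tail_drop] using this
    by_cases hw : pvWs c = true
    · rw [pvTokGo, pvSkipWs]
      rw [← hc] at *
      simp only [hw, if_true]
      exact ih (i+1) htl (by omega)
    · rw [pvTokGo, pvSkipWs]
      rw [← hc] at *
      simp only [hw, Bool.false_eq_true, if_false]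
      obtain ⟨x, tl', hx⟩ := pvTokGo_some_head cs.length tl (i+1) i
      rw [hx]
      simp [hlt]

def pvInv (cs : List Char) (tok i : Nat) : Prop :=
  tok ≤ i ∧ (∀ m, tok ≤ m → m < i → pvWs (cs.getD m ' ') = false) ∧
    (tok = 0 ∨ pvWs (cs.getD (tok - 1) ' ') = true)

lemma pvWordBack_eq_slice (cs : List Char) (tok : Nat) :
    ∀ i acc, pvInv cs tok i → i ≤ cs.length →
      pvWordBack cs i acc = (cs.drop tok).take (i - tok) ++ acc := by
  intro i
  induction i with
  | zero =>
    intro acc ⟨h1, _, _⟩ _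
    interval_cases tok
    simp [pvWordBack]
  | succ j ih =>
    intro acc ⟨h1, h2, h3⟩ hlen
    by_cases htok : tok = j + 1
    · subst htok
      rcases h3 with h | h
      · omega
      · rw [pvWordBack, if_pos (by simpa [List.getD_eq_getElem?_getD] using h)]
        simp
    · have hj : tok ≤ j := by omega
      have hnw : pvWs (cs.getD j ' ') = false := h2 j hj (by omega)
      rw [pvWordBack, if_neg (by simp [- List.getD_eq_getElem?_getD, hnw])]
      rw [ih (cs.getD j ' ' :: acc) ⟨hj, fun m hm hm' => h2 m hm (by omega), h3⟩ (by omega)]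
      have hjlt : j < cs.length := by omega
      have hstep : (j + 1 - tok) = (j - tok) + 1 := by omega
      rw [hstep, List.take_add_one]
      have hget : (cs.drop tok)[j - tok]? = some (cs.getD j ' ') := by
        rw [List.getElem?_drop]
        have : tok + (j - tok) = j := by omega
        rw [this, List.getElem?_eq_getElem hjlt]
        simp [List.getD, List.getElem?_eq_getElem hjlt]
      simp [hget]

-- ===== proof-side step extraction =====
def pvStepA (cs : List Char) (i : Nat) (acc : List Int) : List Int :=
  let c := cs.getD i ' '
  if c == '.' then
    let w := pvWordBack cs i []
    let wl := pvRstripDot (PySem.Chars.lower w)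
    if !w.isEmpty && PySem.Chars.isdigit (w.getLastD ' ') then acc
    else if pvAbbrevs.contains wl then acc
    else if i + 1 < cs.length then
      let nxt := cs.getD (i + 1) ' '
      if pvWs nxt then
        let k := pvSkipWs cs (cs.drop (i + 2)) (i + 2)
        if decide (k < cs.length) && PySem.Chars.isupper (cs.getD k ' ') then
          acc ++ [(i : Int) + 1]
        else acc
      else if nxt == '\n' then acc ++ [(i : Int) + 1]
      else acc
    else if i = cs.length - 1 then acc ++ [(i : Int) + 1]
    else acc
  else if c == '!' || c == '?' then
    if i + 1 < cs.length then
      if pvWs (cs.getD (i + 1) ' ') then acc ++ [(i : Int) + 1] else acc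
    else if i = cs.length - 1 then acc ++ [(i : Int) + 1]
    else acc
  else acc

def pvStepB (cs : List Char) (n s e : Nat) (rest : List (Nat × Nat)) (acc : List Int) : List Int :=
  let ch := cs.getD (e - 1) ' '
  if ch == '!' || ch == '?' then acc ++ [(e : Int)]
  else if ch == '.' then
    let w := PySem.List.slice cs (some (s : Int)) (some ((e : Int) - 1))
    if !w.isEmpty && PySem.Chars.isdigit (w.getLastD ' ') then acc
    else if pvAbbrevs.contains (pvRstripDot (PySem.Chars.lower w)) then acc
    else if e = n then acc ++ [(e : Int)]
    else
      match rest with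
      | (s', _) :: _ => if PySem.Chars.isupper (cs.getD s' ' ') then acc ++ [(e : Int)] else acc
      | [] => acc
  else acc

lemma pvLoopA_cons (cs : List Char) (x : Char) (rest : List Char) (i : Nat) (acc : List Int) :
    pvLoopA cs (x :: rest) i acc = pvLoopA cs rest (i + 1) (pvStepA cs i acc) := rfl

lemma pvScanToks_cons (cs : List Char) (n s e : Nat) (rest : List (Nat × Nat)) (acc : List Int) :
    pvScanToks cs n ((s, e) :: rest) acc = pvScanToks cs n rest (pvStepB cs n s e rest acc) := rfl

lemma pvStepA_mid (cs : List Char) (i : Nat) (acc : List Int)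
    (h1 : i + 1 < cs.length) (h2 : pvWs (cs.getD (i + 1) ' ') = false) :
    pvStepA cs i acc = acc := by
  have hnl : (cs.getD (i + 1) ' ' == '\n') = false := by
    revert h2; simp [pvWs]; intro _ h _; simp [h]
  unfold pvStepA
  simp only [h1, if_true, h2, Bool.false_eq_true, if_false, hnl]
  split_ifs <;> first | rfl | omega

lemma pvDrop_cons (cs : List Char) (i : Nat) (h : i < cs.length) :
    cs.drop i = cs.getD i ' ' :: cs.drop (i + 1) := by
  rw [List.drop_eq_getElem_cons h]
  simp [List.getD, List.getElem?_eq_getElem h]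

lemma pvStepA_ws (cs : List Char) (i : Nat) (acc : List Int)
    (h : pvWs (cs.getD i ' ') = true) : pvStepA cs i acc = acc := by
  have hc3 : cs.getD i ' ' = ' ' ∨ cs.getD i ' ' = '\n' ∨ cs.getD i ' ' = '\t' := by
    revert h; simp [pvWs]; tauto
  unfold pvStepA
  rcases hc3 with h' | h' | h' <;> rw [h'] <;> simp

lemma pvStepAB_end (cs : List Char) (s i : Nat) (acc : List Int)
    (hsi : s ≤ i)
    (hstart : s = 0 ∨ pvWs (cs.getD (s - 1) ' ') = true)
    (hnonws : ∀ m, s ≤ m → m < i → pvWs (cs.getD m ' ') = false)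
    (hin : i + 1 = cs.length) :
    pvStepA cs i acc = pvStepB cs cs.length s cs.length [] acc := by
  have hch : cs.length - 1 = i := by omega
  have hw : PySem.List.slice cs (some (s : Int)) (some ((cs.length : Int) - 1)) =
      pvWordBack cs i [] := by
    have hcast : ((cs.length : Int) - 1) = ((i : Nat) : Int) := by omega
    rw [hcast, PySem.List.slice_toNat cs (Int.natCast_nonneg s) (Int.natCast_nonneg i)]
    simp only [Int.toNat_natCast]
    rw [pvWordBack_eq_slice cs s i [] ⟨hsi, hnonws, hstart⟩ (by omega), List.append_nil]
  have hemit : acc ++ [(i : Int) + 1] = acc ++ [((cs.length : Nat) : Int)] := by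
    have h : (i : Int) + 1 = ((cs.length : Nat) : Int) := by push_cast; omega
    rw [h]
  have hn1 : ¬ (i + 1 < cs.length) := by omega
  have hieq : i = cs.length - 1 := by omega
  unfold pvStepA pvStepB
  rw [hch, hw]
  by_cases hcdot : (cs.getD i ' ' == '.') = true
  · have hnb : (cs.getD i ' ' == '!' || cs.getD i ' ' == '?') = false := by
      simp at hcdot; simp [hcdot]
    simp only [hcdot, hnb, if_true, Bool.false_eq_true, if_false]
    split_ifs <;>
      first
        | rfl
        | exact hemit
        | exact absurd hieq ‹_›
        | exact absurd ‹i + 1 < cs.length› hn1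
        | exact absurd rfl ‹_›
  · by_cases hbang : (cs.getD i ' ' == '!' || cs.getD i ' ' == '?') = true
    · simp only [hcdot, Bool.false_eq_true, if_false, hbang, if_true]
      split_ifs <;>
        first
          | rfl
          | exact hemit
          | exact absurd hieq ‹_›
          | exact absurd ‹i + 1 < cs.length› hn1
          | exact absurd rfl ‹_›
    · simp only [hcdot, hbang, Bool.false_eq_true, if_false]

lemma pvStepAB_mid (cs : List Char) (s i : Nat) (acc : List Int)
    (hsi : s ≤ i)
    (hstart : s = 0 ∨ pvWs (cs.getD (s - 1) ' ') = true)
    (hnonws : ∀ m, s ≤ m → m < i → pvWs (cs.getD m ' ') = false)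
    (h1 : i + 1 < cs.length) (h2 : pvWs (cs.getD (i + 1) ' ') = true) :
    pvStepA cs i acc =
      pvStepB cs cs.length s (i + 1) (pvTokGo cs.length (cs.drop (i + 1 + 1)) (i + 1 + 1) none []) acc := by
  have hch : i + 1 - 1 = i := by omega
  have hw : PySem.List.slice cs (some (s : Int)) (some (((i + 1 : Nat) : Int) - 1)) =
      pvWordBack cs i [] := by
    have hcast : (((i + 1 : Nat) : Int) - 1) = ((i : Nat) : Int) := by push_cast; ring
    rw [hcast, PySem.List.slice_toNat cs (Int.natCast_nonneg s) (Int.natCast_nonneg i)]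
    simp only [Int.toNat_natCast]
    rw [pvWordBack_eq_slice cs s i [] ⟨hsi, hnonws, hstart⟩ (by omega), List.append_nil]
  have hemit : acc ++ [(i : Int) + 1] = acc ++ [((i + 1 : Nat) : Int)] := by push_cast; ring_nf
  have hne : ¬ (i + 1 = cs.length) := by omega
  have h22 : i + 1 + 1 = i + 2 := by omega
  have hhd := pvTokGo_head_skip cs (cs.drop (i + 2)) (i + 2) rfl (by omega)
  unfold pvStepA pvStepB
  rw [hch, hw, h22]
  by_cases hcdot : (cs.getD i ' ' == '.') = true
  · have hnb : (cs.getD i ' ' == '!' || cs.getD i ' ' == '?') = false := by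
      simp at hcdot; simp [hcdot]
    simp only [hcdot, hnb, if_true, Bool.false_eq_true, if_false, h1, h2, hne]
    rcases hRR : pvTokGo cs.length (cs.drop (i + 2)) (i + 2) none [] with _ | ⟨⟨s', e'⟩, tl⟩ <;>
      rw [hRR] at hhd
    · have hk : ¬ (pvSkipWs cs (cs.drop (i + 2)) (i + 2) < cs.length) := by
        intro hk
        rw [if_pos hk] at hhd
        simp at hhd
      simp only [hk, decide_false, Bool.false_and, Bool.false_eq_true, if_false]
      all_goals split_ifs <;> rfl
    · by_cases hk : pvSkipWs cs (cs.drop (i + 2)) (i + 2) < cs.length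
      · rw [if_pos hk] at hhd
        simp only [List.head?_cons, Option.map_some] at hhd
        have hs' : s' = pvSkipWs cs (cs.drop (i + 2)) (i + 2) := by
          simpa using congrArg (fun o => Option.getD o 0) hhd
        rw [hs']
        simp only [hk, decide_true, Bool.true_and]
        split_ifs <;> first | rfl | exact hemit
      · rw [if_neg hk] at hhd; simp at hhd
  · by_cases hbang : (cs.getD i ' ' == '!' || cs.getD i ' ' == '?') = true
    · simp only [hcdot, Bool.false_eq_true, if_false, hbang, if_true]
      split_ifs <;> first | exact hemit | rfl | omega
    · simp only [hcdot, hbang, Bool.false_eq_true, if_false]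
lemma pvMain (cs : List Char) :
    ∀ L i, cs.length - i = L → i ≤ cs.length →
      (∀ s acc, s ≤ i → i < cs.length → (s = 0 ∨ pvWs (cs.getD (s - 1) ' ') = true) →
        (∀ m, s ≤ m → m ≤ i → pvWs (cs.getD m ' ') = false) →
        pvLoopA cs (cs.drop i) i acc =
          pvScanToks cs cs.length (pvTokGo cs.length (cs.drop i) i (some s) []) acc) ∧
      (∀ acc, (i = 0 ∨ pvWs (cs.getD (i - 1) ' ') = true) →
        pvLoopA cs (cs.drop i) i acc =
          pvScanToks cs cs.length (pvTokGo cs.length (cs.drop i) i none []) acc) := by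
  intro L
  induction L using Nat.strong_induction_on with
  | _ L ih =>
  intro i hL hle
  have hB : ∀ s acc, s ≤ i → i < cs.length → (s = 0 ∨ pvWs (cs.getD (s - 1) ' ') = true) →
      (∀ m, s ≤ m → m ≤ i → pvWs (cs.getD m ' ') = false) →
      pvLoopA cs (cs.drop i) i acc =
        pvScanToks cs cs.length (pvTokGo cs.length (cs.drop i) i (some s) []) acc := by
    intro s acc hsi hilt hstart hnonws
    have hci : pvWs (cs.getD i ' ') = false := hnonws i hsi le_rfl
    rw [pvDrop_cons cs i hilt, pvLoopA_cons]
    conv_rhs => rw [pvTokGo]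
    simp only [hci, Bool.false_eq_true, if_false]
    by_cases h1 : i + 1 < cs.length
    · by_cases h2 : pvWs (cs.getD (i + 1) ' ') = true
      · -- i is the token's last character; the token is (s, i+1)
        rw [pvDrop_cons cs (i + 1) h1, pvLoopA_cons, pvStepA_ws cs (i + 1) _ h2]
        conv_rhs => rw [pvTokGo]
        simp only [h2, if_true]
        rw [pvTokGo_append cs.length (cs.drop (i + 1 + 1)) (i + 1 + 1) none ([] ++ [(s, i + 1)])]
        simp only [List.nil_append, List.singleton_append]
        rw [pvScanToks_cons]
        rw [(ih (cs.length - (i + 2)) (by omega) (i + 2) rfl (by omega)).2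
          (pvStepA cs i acc) (Or.inr (by simpa using h2))]
        have h22 : i + 1 + 1 = i + 2 := by omega
        rw [h22]
        congr 1
        rw [← h22]
        exact pvStepAB_mid cs s i acc hsi hstart
          (fun m hm hm' => hnonws m hm (by omega)) h1 h2
      · -- middle of the token
        have h2' : pvWs (cs.getD (i + 1) ' ') = false := by simpa using h2
        rw [pvStepA_mid cs i acc h1 h2']
        exact (ih (cs.length - (i + 1)) (by omega) (i + 1) rfl (by omega)).1 s acc
          (by omega) h1 hstart
          (fun m hm hm' => by
            rcases Nat.lt_or_ge m (i + 1) with h | h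
            · exact hnonws m hm (by omega)
            · have : m = i + 1 := by omega
              rw [this]; exact h2')
    · -- i is the final index of the text
      have hin : i + 1 = cs.length := by omega
      have hdrop1 : cs.drop (i + 1) = [] := List.drop_eq_nil_of_le (by omega)
      rw [hdrop1, pvLoopA]
      have htg : pvTokGo cs.length ([] : List Char) (i + 1) (some s) [] = [(s, cs.length)] := rfl
      rw [htg, pvScanToks_cons, pvScanToks]
      exact pvStepAB_end cs s i acc hsi hstart
        (fun m hm hm' => hnonws m hm (by omega)) hin
  refine ⟨hB, ?_⟩
  -- at a clean position (start of text or just after whitespace)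
  intro acc hclean
  by_cases hilt : i < cs.length
  · by_cases hw : pvWs (cs.getD i ' ') = true
    · rw [pvDrop_cons cs i hilt, pvLoopA_cons, pvStepA_ws cs i acc hw]
      conv_rhs => rw [pvTokGo]
      simp only [hw, if_true]
      exact (ih (cs.length - (i + 1)) (by omega) (i + 1) rfl (by omega)).2 acc
        (Or.inr (by simpa using hw))
    · rw [hB i acc le_rfl hilt hclean
        (fun m hm hm' => by
          have : m = i := by omega
          rw [this]; simpa using hw)]
      congr 1
      conv_lhs => rw [pvDrop_cons cs i hilt, pvTokGo]
      conv_rhs => rw [pvDrop_cons cs i hilt, pvTokGo]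
      have hw2 : pvWs (cs[i]?.getD ' ') = false := by
        rw [← List.getD_eq_getElem?_getD]; simpa using hw
      simp [hw2]
  · have hdrop : cs.drop i = [] := List.drop_eq_nil_of_le (by omega)
    rw [hdrop, pvLoopA, pvTokGo, pvScanToks]

-- ===== VERDICT (by name: the statement is the Claim_ definition above) =====
theorem find_sentence_boundaries_spec : Claim_equal_find_sentence_boundaries := by
  intro text _
  unfold Spec_find_sentence_boundaries find_sentence_boundaries find_sentence_boundaries_alt
  exact (pvMain text.toList (text.toList.length) 0 rfl (by omega)).2 [] (Or.inl rfl)
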